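-- pv_equiv track=rewrite | github.com/dhktjr0204/beakjoon | 프로그래머스/lv1/크기가 작은 부분 문자열.py | solution
-- ===== SOURCE A (Python) =====
-- def solution(t, p):
--     answer = 0
--     num_list=[]
--     for i in range(len(t)-len(p)+1):
--         num_list.append(t[i:i+len(p)])
--     for i in num_list:
--         if int(i)<=int(p):
--             answer+=1
--     return answer
-- ===== SOURCE B (Python) =====
-- def _bisect_right(a, x):
--     # CPython's bisect.bisect_right loop
--     lo, hi = 0, len(a)
--     while lo < hi:
--         mid = (lo + hi) // 2
--         if x < a[mid]:
--             hi = mid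
--         else:
--             lo = mid + 1
--     return lo
--
--
-- def solution(t, p):
--     m = len(p)
--     vals = sorted(int(t[i:i + m]) for i in range(len(t) - m + 1))
--     if not vals:
--         return 0
--     return _bisect_right(vals, int(p))
-- ===== Notes on version B (the rewrite author's own statement) =====
-- stated objective: alternative
-- what changed: B parses every window into a list of ints once, sorts that list, and obtains the count of windows <= int(p) with a single hand-rolled CPython bisect_right binary search, instead of A's build-a-substring-list-then-compare-each loop.
import Mathlib
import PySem

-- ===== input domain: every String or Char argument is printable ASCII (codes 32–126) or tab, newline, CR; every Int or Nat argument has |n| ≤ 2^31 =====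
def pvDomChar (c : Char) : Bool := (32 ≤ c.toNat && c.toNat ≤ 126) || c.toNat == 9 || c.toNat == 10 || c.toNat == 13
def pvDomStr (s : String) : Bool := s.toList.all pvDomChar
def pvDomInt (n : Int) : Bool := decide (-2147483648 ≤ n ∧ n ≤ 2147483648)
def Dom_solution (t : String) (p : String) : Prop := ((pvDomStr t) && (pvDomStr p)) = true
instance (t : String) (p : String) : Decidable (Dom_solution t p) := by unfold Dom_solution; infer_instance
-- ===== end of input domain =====

-- B replaces A's per-window comparison loop by parse-all-windows-to-ints, sort, one bisect_right
-- (a genuinely different counting mechanism of similar cost; not claimed faster).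


-- ===== PORT A =====
-- int() raising ValueError is excluded by Pre_solution; there ofStr? = some, so the '.getD 0'
-- defaults are unreachable on admitted inputs.
def solution (t : String) (p : String) : Int :=
  let numList : List String :=
    (PySem.List.pyRange 0 (PySem.Str.len t - PySem.Str.len p + 1) 1).foldl
      (fun acc i => acc ++ [PySem.Str.slice t (some i) (some (i + PySem.Str.len p))]) []
  numList.foldl
    (fun answer w =>
      if (PySem.Int.ofStr? w).getD 0 ≤ (PySem.Int.ofStr? p).getD 0 then answer + 1 else answer) 0

-- ===== PORT B =====
-- Source B's _bisect_right is CPython's bisect.bisect_right loop verbatim, which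
-- PySem.List.bisectRight models exactly (see PYSEM.md); sorted() with default key is
-- PySem.List.sorted with the identity key.
def solution_alt (t : String) (p : String) : Int :=
  let m := PySem.Str.len p
  let vals : List Int :=
    PySem.List.sorted
      ((PySem.List.pyRange 0 (PySem.Str.len t - m + 1) 1).map
        (fun i => (PySem.Int.ofStr? (PySem.Str.slice t (some i) (some (i + m)))).getD 0))
      (fun x => x) false
  if vals = [] then 0
  else (PySem.List.bisectRight vals ((PySem.Int.ofStr? p).getD 0) : Int)

-- ===== PRECONDITION & SPEC =====
-- Pre_solution is exactly the set of inputs where Python A returns normally: every window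
-- t[i:i+len(p)] parses as int, and p parses as int whenever at least one window exists
-- (with no windows A returns 0 without ever touching int(p)); B raises on the same inputs.
def Pre_solution (t : String) (p : String) : Prop :=
  (∀ i ∈ PySem.List.pyRange 0 (PySem.Str.len t - PySem.Str.len p + 1) 1,
      (PySem.Int.ofStr? (PySem.Str.slice t (some i) (some (i + PySem.Str.len p)))).isSome = true) ∧
  (0 < PySem.Str.len t - PySem.Str.len p + 1 → (PySem.Int.ofStr? p).isSome = true)
instance (t : String) (p : String) : Decidable (Pre_solution t p) := by
  unfold Pre_solution; infer_instance

def pvWitness_solution : String × String := ("3141592", "271")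

def Spec_solution (t : String) (p : String) (out : Int) : Prop := out = solution_alt t p
instance (t : String) (p : String) (out : Int) : Decidable (Spec_solution t p out) := by
  unfold Spec_solution; infer_instance

-- ===== CLAIM (what is proved, stated in full; the proofs are below) =====
def Claim_equal_solution : Prop :=
  ∀ (t : String) (p : String), Dom_solution t p → Pre_solution t p → Spec_solution t p (solution t p)

-- ===== LEMMAS AND PROOFS =====

-- A's first loop: appending singletons is map.
theorem pv_foldl_append_singleton {α β : Type} (f : α → β) (L : List α) (acc : List β) :
    L.foldl (fun a i => a ++ [f i]) acc = acc ++ L.map f := by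
  induction L generalizing acc with
  | nil => simp
  | cons x xs ih => simp [List.foldl, ih]

-- A's second loop: a conditional +1 fold is countP, cast to Int.
theorem pv_foldl_count {α : Type} (P : α → Prop) [DecidablePred P] (L : List α) (acc : Int) :
    L.foldl (fun a w => if P w then a + 1 else a) acc
      = acc + (L.countP (fun w => decide (P w)) : Int) := by
  induction L generalizing acc with
  | nil => simp
  | cons x xs ih =>
      simp only [List.foldl, List.countP_cons, ih]
      by_cases h : P x
      · simp [h]; ring
      · simp [h]

-- bisect_right on a ≤-sorted Int list is the number of elements ≤ x.
theorem pv_bisectRight_eq_countP (xs : List Int) (x : Int)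
    (hs : List.Pairwise (fun a b => a ≤ b) xs) :
    PySem.List.bisectRight xs x = xs.countP (fun y => decide (y ≤ x)) := by
  obtain ⟨hle, hlt, hgt⟩ := PySem.List.bisectRight_spec xs x hs
  set r := PySem.List.bisectRight xs x with hr
  have h1 : ∀ y ∈ xs.take r, (fun y => decide (y ≤ x)) y = true := by
    intro y hy
    obtain ⟨j, hj, rfl⟩ := List.mem_iff_getElem.mp hy
    have hj' : j < r ∧ j < xs.length := by
      simp only [List.length_take] at hj; omega
    have hx := hlt j hj'.2 hj'.1
    simpa [List.getElem_take] using hx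
  have h2 : ∀ y ∈ xs.drop r, ¬ ((fun y => decide (y ≤ x)) y = true) := by
    intro y hy
    obtain ⟨j, hj, rfl⟩ := List.mem_iff_getElem.mp hy
    have hj' : r + j < xs.length := by
      simp only [List.length_drop] at hj; omega
    have hx := hgt (r + j) hj' (Nat.le_add_right r j)
    simpa [List.getElem_drop] using not_le.mpr hx
  calc r = (xs.take r).length := by simp [List.length_take, Nat.min_eq_left hle]
    _ = (xs.take r).countP (fun y => decide (y ≤ x)) := (List.countP_eq_length.mpr h1).symm
    _ = (xs.take r).countP (fun y => decide (y ≤ x))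
        + (xs.drop r).countP (fun y => decide (y ≤ x)) := by
          rw [List.countP_eq_zero.mpr h2]; omega
    _ = ((xs.take r) ++ (xs.drop r)).countP (fun y => decide (y ≤ x)) := by
          rw [List.countP_append]
    _ = xs.countP (fun y => decide (y ≤ x)) := by rw [List.take_append_drop]

-- ===== VERDICT (by name: the statement is the Claim_ definition above) =====
theorem solution_spec : Claim_equal_solution := by
  intro t p _hdom _hpre
  show solution t p = solution_alt t p
  simp only [solution, solution_alt]
  rw [pv_foldl_append_singleton, List.nil_append,
      pv_foldl_count (fun w => (PySem.Int.ofStr? w).getD 0 ≤ (PySem.Int.ofStr? p).getD 0)]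
  set m := PySem.Str.len p with hm
  set pv : Int := (PySem.Int.ofStr? p).getD 0 with hpv
  set L := PySem.List.pyRange 0 (PySem.Str.len t - m + 1) 1 with hL
  set f : Int → String := fun i => PySem.Str.slice t (some i) (some (i + m)) with hf
  set g : Int → Int := fun i => (PySem.Int.ofStr? (f i)).getD 0 with hg
  set vals := PySem.List.sorted (L.map g) (fun x => x) false with hvals
  have hperm : vals.Perm (L.map g) := PySem.List.sorted_perm (L.map g) (fun x => x) false
  by_cases hnil : vals = []
  · have hLg : L.map g = [] := by
      have := hperm; rw [hnil] at this; exact (List.Perm.nil_eq this).symm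
    have hLnil : L = [] := List.map_eq_nil_iff.mp hLg
    simp [hnil, hLnil]
  · rw [if_neg hnil]
    have hsorted : List.Pairwise (fun a b => a ≤ b) vals := by
      simpa using PySem.List.sorted_pairwise (L.map g) (fun x => x)
    rw [pv_bisectRight_eq_countP vals pv hsorted, hperm.countP_eq]
    rw [List.countP_map, List.countP_map]
    rw [Int.zero_add]
    simp only [hg, hf, Function.comp_def]
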